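-- pv_equiv track=rewrite | github.com/Mr-QB/IoTChallend | test.py | selectLesson
-- ===== SOURCE A (Python) =====
-- def selectLesson(time_day, quantity):
--     first_part = time_day[:6]  # Phần đầu tiên của thời gian
--     second_part = time_day[6:]  # Phần thứ hai của thời gian
--
--     def count_consecutive_none(part):
--         current_consecutive_none = 0
--         for i, item in enumerate(part):
--             if item is None:
--                 current_consecutive_none += 1
--                 if current_consecutive_none == quantity:
--                     return [i - quantity + 1, i]
--             else:
--                 current_consecutive_none = 0
--         return [0, 0]
--
--     count_first_part = count_consecutive_none(
--         first_part
--     )  # Đếm số lượng liên tiếp trong phần đầu tiên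
--     count_second_part = count_consecutive_none(
--         second_part
--     )  # Đếm số lượng liên tiếp trong phần thứ hai
--     count_second_part[0] += 6
--     count_second_part[1] += 6
--
--     max_positions = max(
--         [count_first_part, count_second_part], key=lambda x: x[1] - x[0]
--     )  # Chọn vị trí tốt nhất
--     return max_positions
-- ===== SOURCE B (Python) =====
-- def selectLesson(time_day, quantity):
--     # Index-list approach: collect the positions of all None slots, then search
--     # the first window of `quantity` positions that are consecutive integers.
--     def find(part):
--         idx = [i for i, x in enumerate(part) if x is None]
--         if quantity >= 1:
--             for a, b in zip(idx, idx[quantity - 1:]):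
--                 if b - a == quantity - 1:
--                     return [a, b]
--         return [0, 0]
--
--     f = find(time_day[:6])
--     s0 = find(time_day[6:])
--     s = [s0[0] + 6, s0[1] + 6]
--     return s if s[1] - s[0] > f[1] - f[0] else f
-- ===== Notes on version B (the rewrite author's own statement) =====
-- stated objective: alternative
-- what changed: B first materialises the list of None positions and then searches it for the first window of `quantity` positions that are consecutive integers (zip of the index list with itself shifted by quantity-1), instead of A's single in-place scan with an incremental consecutive-None counter; split at 6, +6 offset and first-wins max tie-break are kept.
import Mathlib
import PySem

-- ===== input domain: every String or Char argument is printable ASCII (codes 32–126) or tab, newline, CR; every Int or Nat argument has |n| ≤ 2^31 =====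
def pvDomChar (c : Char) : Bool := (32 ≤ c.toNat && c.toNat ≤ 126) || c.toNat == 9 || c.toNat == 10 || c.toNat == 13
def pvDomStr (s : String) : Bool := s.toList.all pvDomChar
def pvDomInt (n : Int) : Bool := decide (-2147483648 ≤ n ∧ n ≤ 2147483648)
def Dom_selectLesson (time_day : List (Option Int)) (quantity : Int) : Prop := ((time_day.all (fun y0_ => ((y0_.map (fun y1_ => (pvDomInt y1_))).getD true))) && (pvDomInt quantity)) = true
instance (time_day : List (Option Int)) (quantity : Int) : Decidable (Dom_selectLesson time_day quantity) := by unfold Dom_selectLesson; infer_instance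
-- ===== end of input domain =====

-- B builds the list of None positions and searches it for the first window of
-- `quantity` consecutive integer positions, instead of A's incremental
-- consecutive-None counter scan. Objective: alternative (same O(n) cost).

-- ===== PORT A =====
-- count_consecutive_none: the 2-element Python list [a, b] is represented as the pair (a, b).
def pvCountA (quantity : Int) : List (Option Int) → Int → Int → Int × Int
  | [], _, _ => (0, 0)
  | item :: rest, i, cur =>
    match item with
    | none =>
      if cur + 1 = quantity then (i - quantity + 1, i)
      else pvCountA quantity rest (i + 1) (cur + 1)
    | some _ => pvCountA quantity rest (i + 1) 0

def selectLesson (time_day : List (Option Int)) (quantity : Int) : List Int :=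
  let first_part := time_day.take 6        -- time_day[:6] (nonnegative slice)
  let second_part := time_day.drop 6       -- time_day[6:]
  let cf := pvCountA quantity first_part 0 0
  let cs0 := pvCountA quantity second_part 0 0
  let cs := (cs0.1 + 6, cs0.2 + 6)
  -- max([cf, cs], key = fun x => x[1] - x[0]); Python max keeps the FIRST element on ties
  let best := if cs.2 - cs.1 > cf.2 - cf.1 then cs else cf
  [best.1, best.2]

-- ===== PORT B =====
-- [i for i, x in enumerate(part) if x is None]: positions of the None slots,
-- transliterated as a structural recursion carrying enumerate's counter.
def pvNoneIdx : List (Option Int) → Int → List Int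
  | [], _ => []
  | none :: rest, i => i :: pvNoneIdx rest (i + 1)
  | some _ :: rest, i => pvNoneIdx rest (i + 1)

-- the 'for a, b in zip(idx, idx[quantity-1:])' loop body (pair result; [a, b] built by the caller)
def pvFindWin (quantity : Int) : List (Int × Int) → Int × Int
  | [] => (0, 0)
  | (a, b) :: rest => if b - a = quantity - 1 then (a, b) else pvFindWin quantity rest

-- find(part): idx[quantity-1:] is the nonnegative slice = drop (quantity-1) (guarded by quantity >= 1)
def pvFindB (quantity : Int) (part : List (Option Int)) : Int × Int :=
  let idx := pvNoneIdx part 0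
  if 1 ≤ quantity then pvFindWin quantity (idx.zip (idx.drop (quantity - 1).toNat))
  else (0, 0)

def selectLesson_alt (time_day : List (Option Int)) (quantity : Int) : List Int :=
  let f := pvFindB quantity (time_day.take 6)
  let s0 := pvFindB quantity (time_day.drop 6)
  let s := (s0.1 + 6, s0.2 + 6)
  let best := if s.2 - s.1 > f.2 - f.1 then s else f
  [best.1, best.2]

-- ===== PRECONDITION & SPEC =====
def Spec_selectLesson (time_day : List (Option Int)) (quantity : Int) (out : List Int) : Prop := out = selectLesson_alt time_day quantity
instance (time_day : List (Option Int)) (quantity : Int) (out : List Int) : Decidable (Spec_selectLesson time_day quantity out) := by unfold Spec_selectLesson; infer_instance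

-- ===== CLAIM (what is proved, stated in full; the proofs are below) =====
def Claim_equal_selectLesson : Prop := ∀ (time_day : List (Option Int)) (quantity : Int), Dom_selectLesson time_day quantity → Spec_selectLesson time_day quantity (selectLesson time_day quantity)

-- ===== LEMMAS AND PROOFS =====

-- proof-side helper: length of the leading None run
def pvRunLen : List (Option Int) → Nat
  | none :: rest => pvRunLen rest + 1
  | _ => 0

-- proof-side helper: L consecutive integers starting at a
def pvConsec : Int → Nat → List Int
  | _, 0 => []
  | a, L + 1 => a :: pvConsec (a + 1) L

-- proof-side abbreviation for B's window scan on an index list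
def pvWinScan (q : Int) (l : List Int) : Int × Int :=
  pvFindWin q (l.zip (l.drop (q - 1).toNat))

lemma length_pvConsec : ∀ (L : Nat) (a : Int), (pvConsec a L).length = L := by
  intro L
  induction L with
  | zero => intro a; rfl
  | succ m ih => intro a; simp [pvConsec, ih]

lemma getElem?_pvConsec : ∀ (L : Nat) (a : Int) (j : Nat),
    (pvConsec a L)[j]? = if j < L then some (a + (j : Int)) else none := by
  intro L
  induction L with
  | zero => intro a j; simp [pvConsec]
  | succ m ih =>
    intro a j
    cases j with
    | zero => simp [pvConsec]
    | succ k =>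
      rw [show pvConsec a (m + 1) = a :: pvConsec (a + 1) m from rfl]
      rw [List.getElem?_cons_succ, ih]
      by_cases hk : k < m
      · rw [if_pos hk, if_pos (by omega)]
        congr 1
        push_cast
        ring
      · rw [if_neg hk, if_neg (by omega)]

-- quantity ≤ 0: A's counter is ≥ 1 at every equality test, so it never fires
lemma pvCountA_nonpos (q : Int) (hq : q ≤ 0) :
    ∀ (part : List (Option Int)) (i cur : Int), 0 ≤ cur → pvCountA q part i cur = (0, 0) := by
  intro part
  induction part with
  | nil => intro i cur _; simp [pvCountA]
  | cons hd tl ih =>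
    intro i cur hcur
    cases hd with
    | none =>
      have : ¬ (cur + 1 = q) := by omega
      simp [pvCountA, this]
      exact ih (i + 1) (cur + 1) (by omega)
    | some v => simpa [pvCountA] using ih (i + 1) 0 (by omega)

-- A's scan across the leading None run, with counter cur already accumulated
lemma pvCountA_run (q : Int) :
    ∀ (part : List (Option Int)) (i cur : Int), 0 ≤ cur → cur < q →
      pvCountA q part i cur =
        if q ≤ cur + (pvRunLen part : Int) then (i - cur, i + (q - cur) - 1)
        else pvCountA q (List.drop (pvRunLen part) part) (i + (pvRunLen part : Int)) 0 := by
  intro part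
  induction part with
  | nil =>
    intro i cur h0 hlt
    rw [show pvRunLen ([] : List (Option Int)) = 0 from rfl]
    rw [if_neg (by push_cast; omega)]
    simp [pvCountA]
  | cons hd tl ih =>
    intro i cur h0 hlt
    cases hd with
    | some v =>
      rw [show pvRunLen (some v :: tl) = 0 from rfl]
      rw [if_neg (by push_cast; omega)]
      simp [pvCountA]
    | none =>
      have hr : pvRunLen (none :: tl) = pvRunLen tl + 1 := rfl
      by_cases hfire : cur + 1 = q
      · have hcond : q ≤ cur + ((pvRunLen (none :: tl)) : Int) := by rw [hr]; push_cast; omega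
        simp only [pvCountA, hfire, if_pos, hcond, Prod.mk.injEq]
        omega
      · have h1 : pvCountA q (none :: tl) i cur = pvCountA q tl (i + 1) (cur + 1) := by
          simp [pvCountA, hfire]
        rw [h1, ih (i + 1) (cur + 1) (by omega) (by omega)]
        rw [hr]
        push_cast
        have hdrop : List.drop (pvRunLen tl + 1) (none :: tl) = List.drop (pvRunLen tl) tl := rfl
        by_cases hc : q ≤ cur + 1 + ((pvRunLen tl) : Int)
        · have hc' : q ≤ cur + (((pvRunLen tl) : Int) + 1) := by omega
          simp only [hc, if_pos, hc', Prod.mk.injEq]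
          omega
        · have hc' : ¬ (q ≤ cur + (((pvRunLen tl) : Int) + 1)) := by omega
          simp only [hc, hc', hdrop]
          ring_nf

-- pvNoneIdx decomposes as the leading run's consecutive indices ++ the rest
lemma pvNoneIdx_decomp :
    ∀ (part : List (Option Int)) (i : Int),
      pvNoneIdx part i =
        pvConsec i (pvRunLen part) ++
          pvNoneIdx (part.drop (pvRunLen part)) (i + (pvRunLen part : Int)) := by
  intro part
  induction part with
  | nil => intro i; simp [pvNoneIdx, pvRunLen, pvConsec]
  | cons hd tl ih =>
    intro i
    cases hd with
    | some v => simp [pvNoneIdx, pvRunLen, pvConsec]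
    | none =>
      rw [show pvRunLen (none :: tl) = pvRunLen tl + 1 from rfl]
      rw [show pvNoneIdx (none :: tl) i = i :: pvNoneIdx tl (i + 1) from rfl]
      rw [show pvConsec i (pvRunLen tl + 1) = i :: pvConsec (i + 1) (pvRunLen tl) from rfl]
      rw [ih (i + 1), List.drop_succ_cons, List.cons_append]
      have hc : (((pvRunLen tl + 1 : Nat)) : Int) = 1 + (pvRunLen tl : Int) := by push_cast; ring
      rw [hc, ← add_assoc]

-- indexed lower bound: the j-th None position at offset i is at least i + j
lemma pvNoneIdx_lb :
    ∀ (part : List (Option Int)) (i : Int) (j : Nat) (v : Int),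
      (pvNoneIdx part i)[j]? = some v → i + (j : Int) ≤ v := by
  intro part
  induction part with
  | nil => intro i j v h; simp [pvNoneIdx] at h
  | cons hd tl ih =>
    intro i j v h
    cases hd with
    | some w =>
      have := ih (i + 1) j v (by simpa [pvNoneIdx] using h)
      omega
    | none =>
      rw [show pvNoneIdx (none :: tl) i = i :: pvNoneIdx tl (i + 1) from rfl] at h
      cases j with
      | zero => simp at h; omega
      | succ m =>
        have := ih (i + 1) m v (by simpa using h)
        push_cast
        push_cast at this
        omega

-- window-scan step lemmas, driven by l[(q-1).toNat]?
lemma pvWinScan_none (q a : Int) (t : List Int) (h : (a :: t)[(q - 1).toNat]? = none) :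
    pvWinScan q (a :: t) = (0, 0) := by
  have hlen : (a :: t).length ≤ (q - 1).toNat := List.getElem?_eq_none_iff.mp h
  have hd : List.drop (q - 1).toNat (a :: t) = [] := List.drop_eq_nil_iff.mpr hlen
  unfold pvWinScan
  rw [hd, List.zip_nil_right]
  rfl

lemma pvWinScan_some (q a b : Int) (t : List Int) (h : (a :: t)[(q - 1).toNat]? = some b) :
    pvWinScan q (a :: t) = if b - a = q - 1 then (a, b) else pvWinScan q t := by
  have hd : (List.drop (q - 1).toNat (a :: t)).head? = some b := by
    rw [List.head?_drop]; exact h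
  rcases hdd : List.drop (q - 1).toNat (a :: t) with _ | ⟨b', r⟩
  · rw [hdd] at hd; simp at hd
  · rw [hdd] at hd
    simp only [List.head?_cons, Option.some.injEq] at hd
    rw [hd] at hdd
    have hr : r = List.drop (q - 1).toNat t := by
      have h1 : (List.drop (q - 1).toNat (a :: t)).tail = List.drop ((q - 1).toNat + 1) (a :: t) :=
        List.tail_drop ..
      rw [hdd, List.drop_succ_cons] at h1
      simpa using h1
    unfold pvWinScan
    rw [hdd, List.zip_cons_cons]
    rw [show pvFindWin q ((a, b) :: (t.zip r)) =
          if b - a = q - 1 then (a, b) else pvFindWin q (t.zip r) from rfl]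
    rw [hr]

-- a scan on a list shorter than the window width yields (0, 0)
lemma pvWinScan_short (q : Int) (l : List Int) (h : l.length ≤ (q - 1).toNat) :
    pvWinScan q l = (0, 0) := by
  cases l with
  | nil => rfl
  | cons a t => exact pvWinScan_none q a t (List.getElem?_eq_none_iff.mpr h)

-- skipping a consecutive-run prefix that is too short to host a window
lemma pvWinScan_skip (q : Int) (hq : 1 ≤ q) :
    ∀ (L : Nat) (a : Int) (t : List Int), (L : Int) < q →
      (∀ (j : Nat) (v : Int), t[j]? = some v → a + (L : Int) + 1 + (j : Int) ≤ v) →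
      pvWinScan q (pvConsec a L ++ t) = pvWinScan q t := by
  intro L
  induction L with
  | zero => intro a t _ _; simp [pvConsec]
  | succ m ih =>
    intro a t hL hlb
    rw [show pvConsec a (m + 1) ++ t = a :: (pvConsec (a + 1) m ++ t) from rfl]
    rcases h : (a :: (pvConsec (a + 1) m ++ t))[(q - 1).toNat]? with _ | b
    · -- the list is shorter than the window: both sides are (0, 0)
      have hlen : (a :: (pvConsec (a + 1) m ++ t)).length ≤ (q - 1).toNat :=
        List.getElem?_eq_none_iff.mp h
      simp only [List.length_cons, List.length_append, length_pvConsec] at hlen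
      rw [pvWinScan_none q _ _ h, pvWinScan_short q t (by omega)]
    · -- the head window spans past the run: its width is ≥ q, not q - 1
      have hge : m + 1 ≤ (q - 1).toNat := by omega
      obtain ⟨p, hp⟩ : ∃ p, (q - 1).toNat = p + 1 := ⟨(q - 1).toNat - 1, by omega⟩
      have hb : t[(q - 1).toNat - (m + 1)]? = some b := by
        rw [hp, List.getElem?_cons_succ] at h
        rw [List.getElem?_append_right (by rw [length_pvConsec]; omega)] at h
        rw [length_pvConsec] at h
        rw [show (q - 1).toNat - (m + 1) = p - m by omega]
        exact h
      have hlb' := hlb _ _ hb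
      have hne : ¬ (b - a = q - 1) := by omega
      rw [pvWinScan_some q a b _ h, if_neg hne]
      refine ih (a + 1) t (by omega) ?_
      intro j v hv
      have := hlb j v hv
      push_cast at this ⊢
      omega

-- the head of the rest after the leading run is not None
lemma pvRunLen_drop (part : List (Option Int)) :
    part.drop (pvRunLen part) = [] ∨
      ∃ v tl, part.drop (pvRunLen part) = some v :: tl := by
  induction part with
  | nil => left; rfl
  | cons hd tl ih =>
    cases hd with
    | some v => right; exact ⟨v, tl, rfl⟩
    | none =>
      rw [show pvRunLen (none :: tl) = pvRunLen tl + 1 from rfl, List.drop_succ_cons]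
      exact ih

-- main bridge: for quantity ≥ 1, A's counter scan equals B's window search over the None positions
lemma pvCountA_eq_winScan (q : Int) (hq : 1 ≤ q) :
    ∀ (n : Nat) (part : List (Option Int)), part.length ≤ n → ∀ (i : Int),
      pvCountA q part i 0 = pvWinScan q (pvNoneIdx part i) := by
  intro n
  induction n with
  | zero =>
    intro part hlen i
    have : part = [] := List.length_eq_zero_iff.mp (Nat.le_zero.mp hlen)
    subst this
    simp [pvCountA, pvNoneIdx, pvWinScan, pvFindWin]
  | succ m ih =>
    intro part hlen i
    cases part with
    | nil => simp [pvCountA, pvNoneIdx, pvWinScan, pvFindWin]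
    | cons hd tl =>
      cases hd with
      | some v =>
        have h1 : pvCountA q (some v :: tl) i 0 = pvCountA q tl (i + 1) 0 := by
          simp [pvCountA]
        have h2 : pvNoneIdx (some v :: tl) i = pvNoneIdx tl (i + 1) := rfl
        rw [h1, h2]
        exact ih tl (by simpa using Nat.lt_succ_iff.mp (by simpa using hlen)) (i + 1)
      | none =>
        have hL1 : 1 ≤ pvRunLen (none :: tl) := by simp [pvRunLen]
        rw [pvCountA_run q (none :: tl) i 0 (le_refl 0) (by omega)]
        rw [pvNoneIdx_decomp (none :: tl) i]
        -- bound on the rest of the index list (the slot after the run is not None)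
        have hbound : ∀ (j : Nat) (v : Int),
            (pvNoneIdx ((none :: tl).drop (pvRunLen (none :: tl))) (i + (pvRunLen (none :: tl) : Int)))[j]? = some v →
            i + (pvRunLen (none :: tl) : Int) + 1 + (j : Int) ≤ v := by
          intro j v hv
          rcases pvRunLen_drop (none :: tl) with hnil | ⟨w, tl', hw⟩
          · rw [hnil] at hv; simp [pvNoneIdx] at hv
          · rw [hw] at hv
            have := pvNoneIdx_lb tl' (i + (pvRunLen (none :: tl) : Int) + 1) j v
              (by simpa [pvNoneIdx] using hv)
            omega
        by_cases hcase : q ≤ (pvRunLen (none :: tl) : Int)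
        · -- the run is long enough: the very first window matches
          rw [if_pos (by omega)]
          obtain ⟨mm, hm⟩ : ∃ mm, pvRunLen (none :: tl) = mm + 1 :=
            ⟨pvRunLen (none :: tl) - 1, by omega⟩
          rw [hm] at hcase ⊢
          rw [show pvConsec i (mm + 1) ++ pvNoneIdx ((none :: tl).drop (mm + 1)) (i + ((mm + 1 : Nat) : Int))
                = i :: (pvConsec (i + 1) mm ++ pvNoneIdx ((none :: tl).drop (mm + 1)) (i + ((mm + 1 : Nat) : Int))) from rfl]
          have hql : (q - 1).toNat < mm + 1 := by omega
          have hget : (i :: (pvConsec (i + 1) mm ++ pvNoneIdx ((none :: tl).drop (mm + 1)) (i + ((mm + 1 : Nat) : Int))))[(q - 1).toNat]?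
              = some (i + (q - 1)) := by
            rw [show (i :: (pvConsec (i + 1) mm ++ pvNoneIdx ((none :: tl).drop (mm + 1)) (i + ((mm + 1 : Nat) : Int))))
                  = pvConsec i (mm + 1) ++ pvNoneIdx ((none :: tl).drop (mm + 1)) (i + ((mm + 1 : Nat) : Int)) from rfl]
            rw [List.getElem?_append_left (by rw [length_pvConsec]; omega)]
            rw [getElem?_pvConsec, if_pos hql]
            congr 1
            omega
          rw [pvWinScan_some q i (i + (q - 1)) _ hget]
          rw [if_pos (by ring)]
          rw [Prod.mk.injEq]
          constructor <;> ring
        · -- the run is too short: skip it and recurse on the rest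
          rw [if_neg (by omega)]
          have hrest := ih ((none :: tl).drop (pvRunLen (none :: tl)))
            (by rw [List.length_drop]; simp only [List.length_cons] at hlen ⊢; omega)
            (i + (pvRunLen (none :: tl) : Int))
          rw [hrest]
          exact (pvWinScan_skip q hq (pvRunLen (none :: tl)) i _ (by omega) hbound).symm

-- ===== VERDICT (by name: the statement is the Claim_ definition above) =====
theorem selectLesson_spec : Claim_equal_selectLesson := by
  intro time_day quantity _
  unfold Spec_selectLesson selectLesson selectLesson_alt pvFindB
  by_cases hq : 1 ≤ quantity
  · have h1 := pvCountA_eq_winScan quantity hq (time_day.take 6).length (time_day.take 6) (le_refl _) 0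
    have h2 := pvCountA_eq_winScan quantity hq (time_day.drop 6).length (time_day.drop 6) (le_refl _) 0
    simp only [if_pos hq, h1, h2, pvWinScan]
  · have h1 := pvCountA_nonpos quantity (by omega) (time_day.take 6) 0 0 (le_refl 0)
    have h2 := pvCountA_nonpos quantity (by omega) (time_day.drop 6) 0 0 (le_refl 0)
    simp only [if_neg hq, h1, h2]
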